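-- pv_equiv track=rewrite | github.com/elic-eon/autoprover | eval/eval.py | splitCoqtopResult
-- ===== SOURCE A (Python) =====
-- def splitCoqtopResult(result, theoremName):
--     totalSteps = []
--     step = []
--     state = "begin"
--     spliter = theoremName + " <"
--
--     for line in result.split("\n"):
--         line = line.strip()
--         if state == "begin":
--             if line.startswith(spliter):
--                 state = "start"
--                 step = [line]
--         else:
--             if line.startswith(spliter):
--                 state == "state"
--                 totalSteps.append(step)
--                 step = [line]
--             else:
--                 step.append(line)
--     else:
--         totalSteps.append(step)
--
--     return totalSteps
-- ===== SOURCE B (Python) =====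
-- def splitCoqtopResult(result, theoremName):
--     pref = theoremName + " <"
--     steps = []
--     tail = []
--     for line in reversed(result.split("\n")):
--         line = line.strip()
--         if line.startswith(pref):
--             steps = [[line] + tail] + steps
--             tail = []
--         else:
--             tail = [line] + tail
--     return steps if steps else [[]]
-- ===== Notes on version B (the rewrite author's own statement) =====
-- stated objective: alternative
-- what changed: Replaces the forward state-machine fold (begin/start string state, discard-then-collect) by a reverse traversal that builds the steps back-to-front: lines are consumed from the end into a pending tail, each marker line closes a chunk, and leading pre-marker lines are simply left in the dropped tail.
import Mathlib
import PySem

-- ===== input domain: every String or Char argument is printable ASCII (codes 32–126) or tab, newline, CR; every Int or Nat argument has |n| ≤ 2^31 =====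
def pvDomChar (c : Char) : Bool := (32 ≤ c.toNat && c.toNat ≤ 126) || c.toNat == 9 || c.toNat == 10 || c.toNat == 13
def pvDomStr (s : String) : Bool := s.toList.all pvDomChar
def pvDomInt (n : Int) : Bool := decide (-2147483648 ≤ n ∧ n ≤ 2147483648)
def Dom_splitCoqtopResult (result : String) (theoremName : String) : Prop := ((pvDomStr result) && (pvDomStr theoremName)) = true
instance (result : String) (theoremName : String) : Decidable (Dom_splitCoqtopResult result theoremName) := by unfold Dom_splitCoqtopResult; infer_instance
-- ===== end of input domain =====

-- B replaces A's forward state-machine fold by a reverse traversal building the steps back-to-front; objective: alternative (same cost).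

-- ===== PORT A =====
-- A's loop body on the (already stripped) line, state = (totalSteps, step, state : String).
def pvAStep (spliter : String) (st : List (List String) × List String × String) (line : String) :
    List (List String) × List String × String :=
  if st.2.2 = "begin" then
    if PySem.Str.startswith line spliter then (st.1, [line], "start") else st
  else
    if PySem.Str.startswith line spliter then (st.1 ++ [st.2.1], [line], st.2.2)
    else (st.1, st.2.1 ++ [line], st.2.2)

-- result.split("\n"): sep is the nonempty literal "\n", so PySem.Str.split? is always `some`; getD [] is exact.
def splitCoqtopResult (result : String) (theoremName : String) : List (List String) :=
  let spliter := theoremName ++ " <"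
  let fin := ((PySem.Str.split? result "\n").getD []).foldl
    (fun st rawLine => pvAStep spliter st (PySem.Str.strip rawLine)) ([], [], "begin")
  fin.1 ++ [fin.2.1]

-- ===== PORT B =====
-- Source B's loop body on the (already stripped) line, state = (steps, tail); the
-- `for line in reversed(result.split("\n"))` loop with pure prepends is exactly a foldr over the line list.
def pvBStep (pref : String) (line : String) (st : List (List String) × List String) :
    List (List String) × List String :=
  if PySem.Str.startswith line pref then ((line :: st.2) :: st.1, []) else (st.1, line :: st.2)

def splitCoqtopResult_alt (result : String) (theoremName : String) : List (List String) :=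
  let pref := theoremName ++ " <"
  let fin := ((PySem.Str.split? result "\n").getD []).foldr
    (fun rawLine st => pvBStep pref (PySem.Str.strip rawLine) st) ([], [])
  if fin.1 = [] then [[]] else fin.1

-- ===== PRECONDITION & SPEC =====
def Spec_splitCoqtopResult (result : String) (theoremName : String) (out : List (List String)) : Prop := out = splitCoqtopResult_alt result theoremName
instance (result : String) (theoremName : String) (out : List (List String)) : Decidable (Spec_splitCoqtopResult result theoremName out) := by unfold Spec_splitCoqtopResult; infer_instance

-- ===== CLAIM (what is proved, stated in full; the proofs are below) =====
def Claim_equal_splitCoqtopResult : Prop := ∀ (result : String) (theoremName : String), Dom_splitCoqtopResult result theoremName → Spec_splitCoqtopResult result theoremName (splitCoqtopResult result theoremName)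

-- ===== LEMMAS AND PROOFS =====

-- middle spec: the marker-delimited chunks of a (stripped) line list
def pvChunks (pref : String) : List String → List (List String)
  | [] => []
  | l :: ls =>
    if PySem.Str.startswith l pref
    then (l :: ls.takeWhile (fun x => !PySem.Str.startswith x pref)) ::
         pvChunks pref (ls.dropWhile (fun x => !PySem.Str.startswith x pref))
    else pvChunks pref ls
termination_by ls => ls.length
decreasing_by
  · exact Nat.lt_succ_of_le (List.length_dropWhile_le _ _)
  · exact Nat.lt_succ_self _

theorem pvChunks_dropWhile (pref : String) (ls : List String) :
    pvChunks pref (ls.dropWhile (fun x => !PySem.Chars.startswith x.toList pref.toList)) = pvChunks pref ls := by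
  induction ls with
  | nil => rfl
  | cons l ls ih =>
    by_cases h : PySem.Str.startswith l pref
    · have hc : PySem.Chars.startswith l.toList pref.toList = true := by simpa using h
      simp [hc]
    · have hc : PySem.Chars.startswith l.toList pref.toList = false := by simpa using h
      simp [hc, pvChunks, ih]

theorem pvA_loop (pref : String) (ls : List String) :
    ∀ (total : List (List String)) (step : List String) (st : String), st ≠ "begin" →
    (ls.foldl (pvAStep pref) (total, step, st)).1 ++ [(ls.foldl (pvAStep pref) (total, step, st)).2.1]
    = total ++ (step ++ ls.takeWhile (fun x => !PySem.Str.startswith x pref)) :: pvChunks pref ls := by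
  induction ls with
  | nil => intro total step st hst; simp [pvChunks]
  | cons l ls ih =>
    intro total step st hst
    rw [List.foldl_cons]
    by_cases h : PySem.Str.startswith l pref
    · have hc : PySem.Chars.startswith l.toList pref.toList = true := by simpa using h
      have hstep : pvAStep pref (total, step, st) l = (total ++ [step], [l], st) := by
        simp [pvAStep, hst, hc]
      rw [hstep, ih _ _ _ hst]
      simp [pvChunks, hc, pvChunks_dropWhile]
    · have hc : PySem.Chars.startswith l.toList pref.toList = false := by simpa using h
      have hstep : pvAStep pref (total, step, st) l = (total, step ++ [l], st) := by
        simp [pvAStep, hst, hc]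
      rw [hstep, ih _ _ _ hst]
      simp [pvChunks, hc, List.append_assoc]

theorem pvA_eq_chunks (pref : String) (ls : List String) :
    (ls.foldl (pvAStep pref) ([], [], "begin")).1 ++ [(ls.foldl (pvAStep pref) ([], [], "begin")).2.1]
    = if pvChunks pref ls = [] then [[]] else pvChunks pref ls := by
  induction ls with
  | nil => simp [pvChunks]
  | cons l ls ih =>
    rw [List.foldl_cons]
    by_cases h : PySem.Str.startswith l pref
    · have hc : PySem.Chars.startswith l.toList pref.toList = true := by simpa using h
      have hstep : pvAStep pref ([], [], "begin") l = ([], [l], "start") := by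
        simp [pvAStep, hc]
      rw [hstep, pvA_loop pref ls [] [l] "start" (by decide)]
      simp [pvChunks, hc, pvChunks_dropWhile]
    · have hc : PySem.Chars.startswith l.toList pref.toList = false := by simpa using h
      have hstep : pvAStep pref ([], [], "begin") l = ([], [], "begin") := by
        simp [pvAStep, hc]
      rw [hstep, ih]
      simp [pvChunks, hc]

theorem pvB_foldr (pref : String) (ls : List String) :
    ls.foldr (pvBStep pref) ([], [])
    = (pvChunks pref ls, ls.takeWhile (fun x => !PySem.Str.startswith x pref)) := by
  induction ls with
  | nil => simp [pvChunks]
  | cons l ls ih =>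
    rw [List.foldr_cons, ih]
    by_cases h : PySem.Str.startswith l pref
    · have hc : PySem.Chars.startswith l.toList pref.toList = true := by simpa using h
      simp [pvBStep, hc, pvChunks, pvChunks_dropWhile]
    · have hc : PySem.Chars.startswith l.toList pref.toList = false := by simpa using h
      simp [pvBStep, hc, pvChunks]

-- ===== VERDICT (by name: the statement is the Claim_ definition above) =====
theorem splitCoqtopResult_spec : Claim_equal_splitCoqtopResult := by
  intro result theoremName _
  unfold Spec_splitCoqtopResult splitCoqtopResult splitCoqtopResult_alt
  have hA := pvA_eq_chunks (theoremName ++ " <")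
      (((PySem.Str.split? result "\n").getD []).map PySem.Str.strip)
  have hB := pvB_foldr (theoremName ++ " <")
      (((PySem.Str.split? result "\n").getD []).map PySem.Str.strip)
  rw [List.foldl_map] at hA
  rw [List.foldr_map] at hB
  show (((PySem.Str.split? result "\n").getD []).foldl
      (fun st rawLine => pvAStep (theoremName ++ " <") st (PySem.Str.strip rawLine)) ([], [], "begin")).1
      ++ [(((PySem.Str.split? result "\n").getD []).foldl
      (fun st rawLine => pvAStep (theoremName ++ " <") st (PySem.Str.strip rawLine)) ([], [], "begin")).2.1]
    = if (((PySem.Str.split? result "\n").getD []).foldr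
      (fun rawLine st => pvBStep (theoremName ++ " <") (PySem.Str.strip rawLine) st) ([], [])).1 = []
      then [[]]
      else (((PySem.Str.split? result "\n").getD []).foldr
      (fun rawLine st => pvBStep (theoremName ++ " <") (PySem.Str.strip rawLine) st) ([], [])).1
  rw [hA, hB]
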